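-- pv_equiv track=rewrite | github.com/ATZakir/Google-FooBar | challenges/when_it_rains_it_pours.py | find_backward_total
-- ===== SOURCE A (Python) =====
-- def find_backward_total(sub_heights):
-- 	backward_max = max(sub_heights)
-- 	loc = sub_heights.index(backward_max)
-- 	length = len(sub_heights)
-- 	if length < 2:
-- 		return 0
-- 	elif loc == length - 1:
-- 		left_total = find_backward_total(sub_heights[:loc])
-- 		return left_total
-- 	else:
-- 		right_total = sub_heights[loc]*(length - loc - 1) - sum(sub_heights[loc+1:])
-- 		if loc == 0:
-- 			left_total = 0
-- 		else:
-- 			left_total = find_backward_total(sub_heights[:loc])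
-- 		return left_total + right_total
-- ===== SOURCE B (Python) =====
-- def find_backward_total(sub_heights):
--     total = 0
--     running_max = None
--     for x in sub_heights:
--         if running_max is None or x > running_max:
--             running_max = x
--         total += running_max - x
--     return total
-- ===== Notes on version B (the rewrite author's own statement) =====
-- stated objective: faster
-- what changed: Replaced the recursive split-at-the-maximum scheme (each level rescans the list with max/index/sum/slicing) by a single left-to-right pass that keeps the running maximum and accumulates (running_max - x).
import Mathlib
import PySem

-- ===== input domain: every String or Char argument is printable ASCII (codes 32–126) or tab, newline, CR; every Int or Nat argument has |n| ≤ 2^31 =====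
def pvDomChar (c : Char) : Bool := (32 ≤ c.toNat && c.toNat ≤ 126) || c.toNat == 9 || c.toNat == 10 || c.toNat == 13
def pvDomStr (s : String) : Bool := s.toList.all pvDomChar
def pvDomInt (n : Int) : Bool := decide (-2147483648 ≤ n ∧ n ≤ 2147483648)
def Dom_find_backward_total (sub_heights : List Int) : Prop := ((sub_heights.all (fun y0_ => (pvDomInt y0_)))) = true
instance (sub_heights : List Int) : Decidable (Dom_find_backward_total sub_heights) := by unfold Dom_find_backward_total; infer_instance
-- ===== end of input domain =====

-- B replaces A's recursive split-at-the-maximum scheme (quadratic rescans) by one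
-- left-to-right pass keeping the running maximum; equivalence of return values is proved
-- for nonempty lists (A raises ValueError on []).

-- ===== PORT A =====
-- fuel = initial list length; every recursive call is on a strictly shorter prefix,
-- so the fuel is never exhausted on inputs where Python A returns.
def pvAgo : Nat → List Int → Int
  | 0, _ => 0
  | fuel+1, xs =>
    match PySem.List.max? xs (fun y => y) with
    | none => 0   -- max([]) raises in Python; unreachable under Pre_
    | some backward_max =>
      let loc := (PySem.List.index? xs backward_max).getD 0
      let length := xs.length
      if length < 2 then 0
      else if loc = length - 1 then
        pvAgo fuel (PySem.List.slice xs none (some (loc : Int)))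
      else
        let right_total := (PySem.List.pyGet? xs (loc : Int)).getD 0 * ((length : Int) - (loc : Int) - 1)
                           - (PySem.List.slice xs (some ((loc : Int) + 1)) none).sum
        let left_total := if loc = 0 then 0 else pvAgo fuel (PySem.List.slice xs none (some (loc : Int)))
        left_total + right_total

def find_backward_total (sub_heights : List Int) : Int :=
  pvAgo sub_heights.length sub_heights

-- ===== PORT B =====
def pvBstep (st : Option Int × Int) (x : Int) : Option Int × Int :=
  let m := match st.1 with
    | none => x
    | some m0 => if x > m0 then x else m0
  (some m, st.2 + (m - x))

def find_backward_total_alt (sub_heights : List Int) : Int :=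
  (sub_heights.foldl pvBstep (none, 0)).2

-- ===== PRECONDITION & SPEC =====
-- Pre_ excludes only the empty list, on which Python A raises ValueError (max of empty sequence).
def Pre_find_backward_total (sub_heights : List Int) : Prop := sub_heights ≠ []
instance (sub_heights : List Int) : Decidable (Pre_find_backward_total sub_heights) := by
  unfold Pre_find_backward_total; infer_instance
def pvWitness_find_backward_total : List Int := [3, 1, 2]

def Spec_find_backward_total (sub_heights : List Int) (out : Int) : Prop :=
  out = find_backward_total_alt sub_heights
instance (sub_heights : List Int) (out : Int) : Decidable (Spec_find_backward_total sub_heights out) := by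
  unfold Spec_find_backward_total; infer_instance

-- ===== CLAIM (what is proved, stated in full; the proofs are below) =====
def Claim_equal_find_backward_total : Prop := ∀ (sub_heights : List Int), Dom_find_backward_total sub_heights → Pre_find_backward_total sub_heights → Spec_find_backward_total sub_heights (find_backward_total sub_heights)
-- ===== LEMMAS AND PROOFS =====

-- pvF m l = Σ over l of (running max starting from m, minus the element)
def pvF : Int → List Int → Int
  | _, [] => 0
  | m, x :: t => (max m x - x) + pvF (max m x) t

def pvG : List Int → Int
  | [] => 0
  | x :: t => pvF x t

theorem pvBstep_some (m0 a x : Int) :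
    pvBstep (some m0, a) x = (some (max m0 x), a + (max m0 x - x)) := by
  simp only [pvBstep, max_def]
  split_ifs with h1 h2 h2 <;> simp_all <;> omega

theorem pvAlt_fold (l : List Int) : ∀ (m a : Int),
    (l.foldl pvBstep (some m, a)).2 = a + pvF m l := by
  induction l with
  | nil => intro m a; simp [pvF]
  | cons x t ih => intro m a; simp [List.foldl, pvBstep_some, pvF, ih]; ring

theorem alt_eq_pvG (xs : List Int) : find_backward_total_alt xs = pvG xs := by
  cases xs with
  | nil => rfl
  | cons x t =>
    simp only [find_backward_total_alt, List.foldl, pvG]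
    have : pvBstep (none, 0) x = (some x, 0 + (x - x)) := by simp [pvBstep]
    rw [this, pvAlt_fold]; simp

theorem pvF_append (u : List Int) : ∀ (m : Int) (v : List Int),
    pvF m (u ++ v) = pvF m u + pvF (u.foldl max m) v := by
  induction u with
  | nil => intro m v; simp [pvF]
  | cons x t ih => intro m v; simp [pvF, List.foldl, ih]; ring

theorem pvF_const (v : List Int) : ∀ m : Int, (∀ x ∈ v, x ≤ m) →
    pvF m v = m * v.length - v.sum := by
  induction v with
  | nil => intro m _; simp [pvF]
  | cons x t ih =>
    intro m h
    have hx : x ≤ m := h x (by simp)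
    have hmx : max m x = m := max_eq_left hx
    rw [pvF, hmx, ih m (fun y hy => h y (by simp [hy]))]
    simp only [List.length_cons, List.sum_cons]
    push_cast; ring

theorem foldl_max_le (l : List Int) : ∀ (y m : Int), y ≤ m → (∀ x ∈ l, x ≤ m) →
    l.foldl max y ≤ m := by
  induction l with
  | nil => intro y m h _; simpa using h
  | cons x t ih =>
    intro y m hy h
    simp only [List.foldl]
    exact ih _ m (max_le hy (h x (by simp))) (fun z hz => h z (by simp [hz]))

theorem pvG_split (pre suf : List Int) (m : Int)
    (hu : ∀ x ∈ pre, x ≤ m) (hv : ∀ x ∈ suf, x ≤ m) :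
    pvG (pre ++ m :: suf) = pvG pre + (m * suf.length - suf.sum) := by
  cases pre with
  | nil =>
    simp only [List.nil_append, pvG]
    rw [pvF_const suf m hv]; ring
  | cons y t =>
    simp only [List.cons_append, pvG, pvF_append]
    have hfm : t.foldl max y ≤ m :=
      foldl_max_le t y m (hu y (by simp)) (fun z hz => hu z (by simp [hz]))
    rw [pvF]
    rw [max_eq_right hfm, pvF_const suf m hv]
    ring

theorem pvAgo_eq_pvG : ∀ (fuel : Nat) (xs : List Int), xs ≠ [] → xs.length ≤ fuel + 1 →
    pvAgo (fuel + 1) xs = pvG xs := by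
  intro fuel
  induction fuel with
  | zero =>
    intro xs hne hlen
    match xs, hne with
    | [x], _ => simp [pvAgo, pvG, pvF, PySem.List.max?_id_cons]
    | x :: y :: t, _ => simp at hlen
  | succ f ih =>
    intro xs hne hlen
    obtain ⟨m, hm⟩ : ∃ m, PySem.List.max? xs (fun y => y) = some m := by
      cases xs with
      | nil => exact absurd rfl hne
      | cons x t => exact ⟨t.foldl max x, PySem.List.max?_id_cons x t⟩
    have hmem : m ∈ xs := PySem.List.max?_mem hm
    have hmax : ∀ y ∈ xs, y ≤ m := by
      intro y hy; simpa using PySem.List.max?_isMax hm y hy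
    obtain ⟨k, hk⟩ : ∃ k, PySem.List.index? xs m = some k :=
      Option.isSome_iff_exists.1 ((PySem.List.index?_isSome_iff xs m).2 hmem)
    obtain ⟨pre, suf, hsplit, hklen, hnotpre⟩ :=
      (PySem.List.index?_eq_some_iff xs m k).1 hk
    have hxslen : xs.length = pre.length + 1 + suf.length := by
      subst hsplit; simp; omega
    have hpre_le : ∀ x ∈ pre, x ≤ m := fun x hx => hmax x (by subst hsplit; simp [hx])
    have hsuf_le : ∀ x ∈ suf, x ≤ m := fun x hx => hmax x (by subst hsplit; simp [hx])
    have htake : PySem.List.slice xs none (some (k : Int)) = pre := by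
      rw [PySem.List.slice_to_natCast]
      subst hsplit; rw [← hklen]
      simp
    have hdrop : PySem.List.slice xs (some ((k : Int) + 1)) none = suf := by
      have : ((k : Int) + 1) = ((k + 1 : Nat) : Int) := by push_cast; ring
      rw [this, PySem.List.slice_from_natCast]
      subst hsplit; rw [← hklen]
      simp [List.drop_append]
    have hget : (PySem.List.pyGet? xs (k : Int)).getD 0 = m := by
      rw [PySem.List.pyGet?_natCast]
      subst hsplit; rw [← hklen]
      simp
    rw [pvAgo]
    simp only [hm, hk, Option.getD_some]
    by_cases h1 : xs.length < 2
    · -- singleton list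
      simp only [if_pos h1]
      match xs, hne, h1 with
      | [x], _, _ => simp [pvG, pvF]
    · simp only [if_neg h1]
      by_cases h2 : k = xs.length - 1
      · -- max is the last element: suf = []
        simp only [if_pos h2]
        have hsuf : suf = [] := by
          rw [← hklen] at h2
          cases suf with
          | nil => rfl
          | cons a b => simp only [List.length_cons] at hxslen; omega
        have hprene : pre ≠ [] := by
          intro hp; rw [← hklen, hp] at h2; simp at h2; omega
        rw [htake, ih pre hprene (by omega)]
        subst hsplit; rw [hsuf, pvG_split pre [] m hpre_le (by simp)]
        simp
      · simp only [if_neg h2]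
        rw [htake, hdrop, hget]
        have hlenint : ((xs.length : Int) - (k : Int) - 1) = (suf.length : Int) := by
          rw [hxslen, ← hklen]; push_cast; ring
        rw [hlenint]
        subst hsplit
        rw [pvG_split pre suf m hpre_le hsuf_le]
        by_cases h3 : k = 0
        · have hpre : pre = [] := by rw [← hklen] at h3; exact List.eq_nil_of_length_eq_zero h3
          simp only [if_pos h3, hpre]
          simp [pvG]
        · have hprene : pre ≠ [] := by
            intro hp; apply h3; rw [← hklen, hp]; rfl
          simp only [if_neg h3]
          rw [ih pre hprene (by omega)]

-- ===== VERDICT (by name: the statement is the Claim_ definition above) =====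
theorem find_backward_total_spec : Claim_equal_find_backward_total := by
  intro xs _ hpre
  unfold Spec_find_backward_total find_backward_total
  rw [alt_eq_pvG]
  cases xs with
  | nil => exact absurd rfl hpre
  | cons x t =>
    have : (x :: t).length = t.length + 1 := by simp
    rw [this, pvAgo_eq_pvG t.length (x :: t) hpre (by simp)]
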